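-- pv_equiv track=rewrite | github.com/pooja654/crossword_generator | generate.py | clean_placed_words
-- ===== SOURCE A (Python) =====
-- def clean_placed_words(positioned_words):
--   cleaned_words = {}
--   for word1 in positioned_words:
--     overlap_found = False
--     for word2 in positioned_words:
--       if (word1 != word2 and positioned_words[word1][0] == positioned_words[word2][0]
--         and positioned_words[word1][1] == positioned_words[word2][1] and
--         positioned_words[word1][2] == positioned_words[word2][2]):
--           if len(word1) < len(word2):
--             overlap_found = True
--     if not overlap_found:
--       cleaned_words[word1] = positioned_words[word1]
--
--   return cleaned_words
-- ===== SOURCE B (Python) =====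
-- def clean_placed_words(positioned_words):
--   best = {}
--   for word, pos in positioned_words.items():
--     key = tuple(pos[:3])
--     if len(word) > best.get(key, -1):
--       best[key] = len(word)
--   return {word: pos for word, pos in positioned_words.items()
--           if len(word) == best[tuple(pos[:3])]}
-- ===== Notes on version B (the rewrite author's own statement) =====
-- stated objective: faster
-- what changed: B replaces A's quadratic all-pairs comparison with a single dict pass recording the maximum word length per position triple tuple(pos[:3]) followed by one filtering pass.
import Mathlib
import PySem

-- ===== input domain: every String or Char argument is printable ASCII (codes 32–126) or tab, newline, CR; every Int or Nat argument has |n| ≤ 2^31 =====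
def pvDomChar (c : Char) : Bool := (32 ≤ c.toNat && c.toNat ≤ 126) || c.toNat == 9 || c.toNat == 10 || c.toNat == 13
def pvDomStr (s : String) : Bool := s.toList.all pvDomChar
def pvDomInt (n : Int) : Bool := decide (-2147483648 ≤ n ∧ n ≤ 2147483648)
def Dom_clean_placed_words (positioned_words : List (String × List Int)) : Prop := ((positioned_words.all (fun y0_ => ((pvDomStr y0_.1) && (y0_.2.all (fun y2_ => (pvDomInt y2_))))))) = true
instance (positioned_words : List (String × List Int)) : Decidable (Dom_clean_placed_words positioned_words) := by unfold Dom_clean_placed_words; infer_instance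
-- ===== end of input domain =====

-- B replaces A's quadratic all-pairs scan with one dict pass recording the maximum word length
-- per position triple and one filtering pass (asymptotically faster).
-- The input dict is encoded as an association list; Pre_ requires the keys distinct (a Python
-- dict cannot hold duplicate keys) so positioned_words[word] is the value paired with word.

-- ===== PORT A =====
-- positioned_words[wordᵢ][j]: under Pre_ the lazily-reached indices are in range, so the
-- pyGetD default 0 is never the result of an admitted lookup; cleaned_words[word1] = …
-- inserts a fresh key (keys are distinct), i.e. appends.
def clean_placed_words (positioned_words : List (String × List Int)) : List (String × List Int) :=
  positioned_words.foldl (fun cleaned_words word1 =>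
    let overlap_found :=
      positioned_words.foldl (fun overlap_found word2 =>
        if word1.1 ≠ word2.1 ∧
           PySem.List.pyGetD word1.2 0 0 = PySem.List.pyGetD word2.2 0 0 ∧
           PySem.List.pyGetD word1.2 1 0 = PySem.List.pyGetD word2.2 1 0 ∧
           PySem.List.pyGetD word1.2 2 0 = PySem.List.pyGetD word2.2 2 0 then
          (if PySem.Str.len word1.1 < PySem.Str.len word2.1 then true else overlap_found)
        else overlap_found) false
    if overlap_found then cleaned_words else cleaned_words ++ [word1]) []

-- ===== PORT B =====
-- tuple(pos[:3]) — the grouping key of Source B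
def pvKey (pos : List Int) : List Int := PySem.List.slice pos none (some 3)

def clean_placed_words_alt (positioned_words : List (String × List Int)) : List (String × List Int) :=
  let best :=
    positioned_words.foldl (fun best p =>
      if PySem.Str.len p.1 > best.getD (pvKey p.2) (-1) then
        best.insert (pvKey p.2) (PySem.Str.len p.1)
      else best)
      (PySem.Dict.empty : PySem.Dict (List Int) Int)
  positioned_words.filter (fun p => decide (PySem.Str.len p.1 = best.getD (pvKey p.2) (-1)))

-- ===== PRECONDITION & SPEC =====
-- Pre_ admits exactly the dicts on which A returns: keys distinct (an association list with
-- duplicate keys does not encode a Python dict), and no pair of distinct words whose position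
-- lists agree on their common prefix while one is shorter than 3 — exactly the pairs on which
-- A's lazily evaluated comparison chain hits an out-of-range index and raises IndexError.
def Pre_clean_placed_words (positioned_words : List (String × List Int)) : Prop :=
  (positioned_words.map Prod.fst).Nodup ∧
  ∀ p ∈ positioned_words, ∀ q ∈ positioned_words, p.1 ≠ q.1 →
    ¬ (min p.2.length q.2.length < 3 ∧
       p.2.take (min p.2.length q.2.length) = q.2.take (min p.2.length q.2.length))
instance (positioned_words : List (String × List Int)) : Decidable (Pre_clean_placed_words positioned_words) := by
  unfold Pre_clean_placed_words; infer_instance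

def pvWitness_clean_placed_words : (List (String × List Int)) :=
  [("ab", [1, 2, 3]), ("c", [1, 2, 3]), ("x", [0, 0, 0, 9])]

def Spec_clean_placed_words (positioned_words : List (String × List Int)) (out : List (String × List Int)) : Prop := out = clean_placed_words_alt positioned_words
instance (positioned_words : List (String × List Int)) (out : List (String × List Int)) : Decidable (Spec_clean_placed_words positioned_words out) := by unfold Spec_clean_placed_words; infer_instance

-- ===== CLAIM (what is proved, stated in full; the proofs are below) =====
def Claim_equal_clean_placed_words : Prop := ∀ (positioned_words : List (String × List Int)), Dom_clean_placed_words positioned_words → Pre_clean_placed_words positioned_words → Spec_clean_placed_words positioned_words (clean_placed_words positioned_words)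

-- ===== LEMMAS AND PROOFS =====

theorem pvKey_eq_take (v : List Int) : pvKey v = v.take 3 := by
  unfold pvKey; rw [PySem.List.slice_to v (by norm_num)]; rfl

theorem pvLen_nonneg (s : String) : 0 ≤ PySem.Str.len s := by
  rw [PySem.Str.len_eq]; positivity

-- the getD-based index comparison A makes equals take-3 equality on every pair Pre_ admits
theorem pv_eqE_iff (v1 v2 : List Int)
    (hnr : ¬ (min v1.length v2.length < 3 ∧
       v1.take (min v1.length v2.length) = v2.take (min v1.length v2.length))) :
    (PySem.List.pyGetD v1 0 0 = PySem.List.pyGetD v2 0 0 ∧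
     PySem.List.pyGetD v1 1 0 = PySem.List.pyGetD v2 1 0 ∧
     PySem.List.pyGetD v1 2 0 = PySem.List.pyGetD v2 2 0) ↔ v1.take 3 = v2.take 3 := by
  rw [PySem.List.pyGetD_ofNat' v1 0 0, PySem.List.pyGetD_ofNat' v2 0 0,
      PySem.List.pyGetD_ofNat' v1 1 0, PySem.List.pyGetD_ofNat' v2 1 0,
      PySem.List.pyGetD_ofNat' v1 2 0, PySem.List.pyGetD_ofNat' v2 2 0]
  rcases v1 with _ | ⟨a1, _ | ⟨b1, _ | ⟨c1, t1⟩⟩⟩ <;>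
    rcases v2 with _ | ⟨a2, _ | ⟨b2, _ | ⟨c2, t2⟩⟩⟩ <;>
    simp_all [List.getD, List.take, List.length, Nat.min_def]

-- the greatest word length in the group of position key k (-1 when the group is empty)
def pvGmax : List (String × List Int) → List Int → Int
  | [], _ => -1
  | p :: l, k => if pvKey p.2 = k then max (PySem.Str.len p.1) (pvGmax l k) else pvGmax l k

theorem pvGmax_ge (l : List (String × List Int)) (k : List Int) : -1 ≤ pvGmax l k := by
  induction l with
  | nil => simp [pvGmax]
  | cons p l ih =>
    simp only [pvGmax]; split
    · have := pvLen_nonneg p.1; omega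
    · exact ih

theorem pvGmax_le {l : List (String × List Int)} {q : String × List Int} {k : List Int}
    (hq : q ∈ l) (hk : pvKey q.2 = k) : PySem.Str.len q.1 ≤ pvGmax l k := by
  induction l with
  | nil => cases hq
  | cons p l ih =>
    rcases List.mem_cons.mp hq with hq | hq
    · subst hq; simp only [pvGmax, hk]; exact le_max_left _ _
    · have := ih hq
      simp only [pvGmax]; split <;> omega

theorem pvGmax_cases (l : List (String × List Int)) (k : List Int) :
    pvGmax l k = -1 ∨ ∃ q ∈ l, pvKey q.2 = k ∧ pvGmax l k = PySem.Str.len q.1 := by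
  induction l with
  | nil => left; rfl
  | cons p l ih =>
    simp only [pvGmax]; split
    · rename_i hkey
      rcases ih with h | ⟨q, hq, hqk, hqv⟩
      · right; exact ⟨p, List.mem_cons_self .., hkey, by rw [h]; have := pvLen_nonneg p.1; omega⟩
      · rcases le_or_gt (pvGmax l k) (PySem.Str.len p.1) with hle | hgt
        · right; exact ⟨p, List.mem_cons_self .., hkey, by omega⟩
        · right; exact ⟨q, List.mem_cons_of_mem _ hq, hqk, by omega⟩
    · rcases ih with h | ⟨q, hq, hqk, hqv⟩
      · left; exact h
      · right; exact ⟨q, List.mem_cons_of_mem _ hq, hqk, hqv⟩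

-- B's dict loop computes exactly pvGmax
theorem pv_best_getD (l : List (String × List Int)) (d : PySem.Dict (List Int) Int)
    (hd : ∀ k, -1 ≤ d.getD k (-1)) (k : List Int) :
    (l.foldl (fun best p =>
      if PySem.Str.len p.1 > best.getD (pvKey p.2) (-1) then
        best.insert (pvKey p.2) (PySem.Str.len p.1)
      else best) d).getD k (-1) = max (d.getD k (-1)) (pvGmax l k) := by
  induction l generalizing d with
  | nil => have := hd k; simp [pvGmax]; omega
  | cons p l ih =>
    simp only [List.foldl_cons, pvGmax]
    by_cases hgt : PySem.Str.len p.1 > d.getD (pvKey p.2) (-1)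
    · rw [if_pos hgt, ih _ (fun k' => by
        rw [PySem.Dict.getD_insert]
        split
        · exact le_trans (by norm_num) (pvLen_nonneg p.1)
        · exact hd k')]
      rw [PySem.Dict.getD_insert]
      by_cases hk : pvKey p.2 = k
      · rw [if_pos hk, if_pos (hk.symm)]
        have := hd k; have := pvLen_nonneg p.1
        rw [hk] at hgt; omega
      · rw [if_neg hk, if_neg (fun h => hk h.symm)]
    · rw [if_neg hgt, ih _ hd]
      by_cases hk : pvKey p.2 = k
      · rw [if_pos hk]; rw [hk] at hgt; omega
      · rw [if_neg hk]

-- A's inner flag loop is an 'any' over the pairs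
theorem pv_foldl_flag {α : Type} (P Q : α → Prop) [DecidablePred P] [DecidablePred Q] :
    ∀ (l : List α) (b : Bool),
      l.foldl (fun ov x => if P x then (if Q x then true else ov) else ov) b
        = (b || l.any (fun x => decide (P x) && decide (Q x))) := by
  intro l
  induction l with
  | nil => simp
  | cons a l ih =>
    intro b
    simp only [List.foldl_cons, List.any_cons, ih]
    by_cases hP : P a <;> by_cases hQ : Q a <;> simp [hP, hQ]

-- A's outer loop keeps, in order, the entries whose flag stays false
theorem pv_foldl_skip {α : Type} (f : α → Bool) :
    ∀ (l : List α) (acc : List α),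
      l.foldl (fun acc x => if f x then acc else acc ++ [x]) acc
        = acc ++ l.filter (fun x => !f x) := by
  intro l
  induction l with
  | nil => simp
  | cons a l ih =>
    intro acc
    simp only [List.foldl_cons, List.filter_cons]
    by_cases h : f a <;> simp [h, ih]

-- pointwise: A keeps p  ↔  p's length is the greatest in its position group
theorem pv_keep_iff (pw : List (String × List Int)) (hPre : Pre_clean_placed_words pw)
    (p : String × List Int) (hp : p ∈ pw) :
    (¬ ∃ q ∈ pw, (p.1 ≠ q.1 ∧
        PySem.List.pyGetD p.2 0 0 = PySem.List.pyGetD q.2 0 0 ∧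
        PySem.List.pyGetD p.2 1 0 = PySem.List.pyGetD q.2 1 0 ∧
        PySem.List.pyGetD p.2 2 0 = PySem.List.pyGetD q.2 2 0) ∧
        PySem.Str.len p.1 < PySem.Str.len q.1)
      ↔ PySem.Str.len p.1 = pvGmax pw (pvKey p.2) := by
  obtain ⟨hnd, hnr⟩ := hPre
  constructor
  · intro hno
    have hle : PySem.Str.len p.1 ≤ pvGmax pw (pvKey p.2) := pvGmax_le hp rfl
    rcases eq_or_lt_of_le hle with h | hlt
    · exact h
    · exfalso
      rcases pvGmax_cases pw (pvKey p.2) with h | ⟨q, hq, hqk, hqv⟩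
      · have := pvLen_nonneg p.1; omega
      · have hne : p.1 ≠ q.1 := by
          intro he
          have : p = q := List.inj_on_of_nodup_map hnd hp hq he
          subst this; omega
        have htake : p.2.take 3 = q.2.take 3 := by
          rw [← pvKey_eq_take, ← pvKey_eq_take, hqk]
        have hE := (pv_eqE_iff p.2 q.2 (hnr p hp q hq hne)).mpr htake
        exact hno ⟨q, hq, ⟨hne, hE⟩, by omega⟩
  · rintro hmax ⟨q, hq, ⟨hne, hE⟩, hlt⟩
    have htake := (pv_eqE_iff p.2 q.2 (hnr p hp q hq hne)).mp hE
    have hqk : pvKey q.2 = pvKey p.2 := by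
      rw [pvKey_eq_take, pvKey_eq_take, htake]
    have := pvGmax_le hq hqk
    omega

-- ===== VERDICT (by name: the statement is the Claim_ definition above) =====
theorem clean_placed_words_spec : Claim_equal_clean_placed_words := by
  unfold Claim_equal_clean_placed_words
  intro pw _ hPre
  unfold Spec_clean_placed_words clean_placed_words clean_placed_words_alt
  -- rewrite A's outer loop: inner flag loop becomes an 'any', outer loop a filter
  have hA : (pw.foldl (fun cleaned_words word1 =>
      let overlap_found :=
        pw.foldl (fun overlap_found word2 =>
          if word1.1 ≠ word2.1 ∧
             PySem.List.pyGetD word1.2 0 0 = PySem.List.pyGetD word2.2 0 0 ∧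
             PySem.List.pyGetD word1.2 1 0 = PySem.List.pyGetD word2.2 1 0 ∧
             PySem.List.pyGetD word1.2 2 0 = PySem.List.pyGetD word2.2 2 0 then
            (if PySem.Str.len word1.1 < PySem.Str.len word2.1 then true else overlap_found)
          else overlap_found) false
      if overlap_found then cleaned_words else cleaned_words ++ [word1]) [])
      = pw.filter (fun word1 => !(pw.any (fun word2 =>
          decide (word1.1 ≠ word2.1 ∧
             PySem.List.pyGetD word1.2 0 0 = PySem.List.pyGetD word2.2 0 0 ∧
             PySem.List.pyGetD word1.2 1 0 = PySem.List.pyGetD word2.2 1 0 ∧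
             PySem.List.pyGetD word1.2 2 0 = PySem.List.pyGetD word2.2 2 0) &&
          decide (PySem.Str.len word1.1 < PySem.Str.len word2.1)))) := by
    have hstep : ∀ word1 : String × List Int,
        pw.foldl (fun overlap_found word2 =>
          if word1.1 ≠ word2.1 ∧
             PySem.List.pyGetD word1.2 0 0 = PySem.List.pyGetD word2.2 0 0 ∧
             PySem.List.pyGetD word1.2 1 0 = PySem.List.pyGetD word2.2 1 0 ∧
             PySem.List.pyGetD word1.2 2 0 = PySem.List.pyGetD word2.2 2 0 then
            (if PySem.Str.len word1.1 < PySem.Str.len word2.1 then true else overlap_found)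
          else overlap_found) false
        = pw.any (fun word2 =>
          decide (word1.1 ≠ word2.1 ∧
             PySem.List.pyGetD word1.2 0 0 = PySem.List.pyGetD word2.2 0 0 ∧
             PySem.List.pyGetD word1.2 1 0 = PySem.List.pyGetD word2.2 1 0 ∧
             PySem.List.pyGetD word1.2 2 0 = PySem.List.pyGetD word2.2 2 0) &&
          decide (PySem.Str.len word1.1 < PySem.Str.len word2.1)) := by
      intro word1
      rw [pv_foldl_flag]
      simp
    calc _ = pw.foldl (fun cleaned_words word1 =>
              if (pw.any (fun word2 =>
                decide (word1.1 ≠ word2.1 ∧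
                  PySem.List.pyGetD word1.2 0 0 = PySem.List.pyGetD word2.2 0 0 ∧
                  PySem.List.pyGetD word1.2 1 0 = PySem.List.pyGetD word2.2 1 0 ∧
                  PySem.List.pyGetD word1.2 2 0 = PySem.List.pyGetD word2.2 2 0) &&
                decide (PySem.Str.len word1.1 < PySem.Str.len word2.1)))
              then cleaned_words else cleaned_words ++ [word1]) [] := by
            congr 1; funext cleaned_words word1; rw [hstep word1]
      _ = _ := by rw [pv_foldl_skip]; rfl
  rw [hA]
  -- rewrite B's dict lookup to pvGmax
  have hB : ∀ p : String × List Int,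
      (pw.foldl (fun best p =>
        if PySem.Str.len p.1 > best.getD (pvKey p.2) (-1) then
          best.insert (pvKey p.2) (PySem.Str.len p.1)
        else best) (PySem.Dict.empty : PySem.Dict (List Int) Int)).getD (pvKey p.2) (-1)
        = pvGmax pw (pvKey p.2) := by
    intro p
    rw [pv_best_getD pw PySem.Dict.empty (fun k => by simp [PySem.Dict.getD_empty]) (pvKey p.2)]
    simp [PySem.Dict.getD_empty]
    exact pvGmax_ge pw (pvKey p.2)
  refine (List.filter_congr ?_).symm
  intro p hp
  rw [hB p]
  have h := pv_keep_iff pw hPre p hp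
  by_cases hh : PySem.Str.len p.1 = pvGmax pw (pvKey p.2)
  · have := h.mpr hh
    rw [decide_eq_true hh, eq_comm, Bool.not_eq_true', List.any_eq_false]
    intro q hq
    simp only [Bool.and_eq_true, decide_eq_true_eq, not_and]
    intro hPq hQq
    exact this ⟨q, hq, hPq, hQq⟩
  · have hex : ∃ q ∈ pw, (p.1 ≠ q.1 ∧ _ ∧ _ ∧ _) ∧ PySem.Str.len p.1 < PySem.Str.len q.1 :=
      by_contra fun hno => hh (h.mp hno)
    obtain ⟨q, hq, hPq, hQq⟩ := hex
    rw [decide_eq_false hh, eq_comm, Bool.not_eq_false', List.any_eq_true]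
    exact ⟨q, hq, by
      rw [Bool.and_eq_true, decide_eq_true_eq, decide_eq_true_eq]
      exact ⟨hPq, hQq⟩⟩
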